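-- pv_equiv track=rewrite | github.com/Arsen1302/Code-copy-detector | TestData/solutions/problem_1686_3.py | solution_1686_3
-- ===== SOURCE A (Python) =====
-- from typing import List
--
-- def solution_1686_3(n: int, logs: List[List[int]]) -> int:
--     startTime, maxTime, ans = 0, 0, 0
--     for i, e in logs:
--         t = e - startTime
--         if t >= maxTime:
--             ans = min(ans,i) if t == maxTime else i
--             maxTime = t
--         startTime = e
--     return ans
-- ===== SOURCE B (Python) =====
-- def solution_1686_3(n, logs):
--     # sort-then-pick: collect (negated duration, id) candidates, sort lexicographically,
--     # the head is the longest duration with the smallest id on ties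
--     prev = 0
--     cands = [(0, 0)]
--     for i, e in logs:
--         cands.append((prev - e, i))
--         prev = e
--     cands.sort()
--     return cands[0][1]
-- ===== Notes on version B (the rewrite author's own statement) =====
-- stated objective: alternative
-- what changed: Replaces A's fused single-pass running-max over mutable (startTime, maxTime, ans) state with a sort-then-pick strategy: build (negated duration, id) candidate pairs (baseline (0,0) included), sort them lexicographically, and return the id of the first element.
-- outside the precondition, e.g. on solution_1686_3(2, [[1, 5, 9]]): A raises ValueError, B raises ValueError
import Mathlib
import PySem

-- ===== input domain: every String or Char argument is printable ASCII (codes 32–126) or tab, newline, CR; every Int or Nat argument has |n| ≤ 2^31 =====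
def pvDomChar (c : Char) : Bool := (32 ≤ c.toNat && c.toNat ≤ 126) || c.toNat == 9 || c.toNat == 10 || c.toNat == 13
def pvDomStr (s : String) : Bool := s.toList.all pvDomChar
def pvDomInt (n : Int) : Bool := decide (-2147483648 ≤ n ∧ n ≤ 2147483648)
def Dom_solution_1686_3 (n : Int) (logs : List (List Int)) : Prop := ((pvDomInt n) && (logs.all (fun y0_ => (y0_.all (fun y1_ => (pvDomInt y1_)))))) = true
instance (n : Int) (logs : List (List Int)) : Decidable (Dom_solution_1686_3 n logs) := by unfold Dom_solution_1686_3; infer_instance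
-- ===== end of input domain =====

-- B replaces A's fused running-max loop by collecting (negated duration, id) candidate
-- pairs, sorting them lexicographically and picking the head's id; same result, a
-- sort-then-pick decomposition instead of a one-pass accumulator.

-- ===== PORT A =====
def solution_1686_3 (n : Int) (logs : List (List Int)) : Int :=
  (logs.foldl (fun (st : Int × Int × Int) row =>
      match row with
      | [i, e] =>
        let t := e - st.1
        if t ≥ st.2.1 then (e, t, if t = st.2.1 then min st.2.2 i else i)
        else (e, st.2.1, st.2.2)
      | _ => st) ((0 : Int), (0 : Int), (0 : Int))).2.2

-- ===== PORT B =====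
def solution_1686_3_alt (n : Int) (logs : List (List Int)) : Int :=
  -- prev = 0; cands = [(0,0)]; for i, e in logs: cands.append((prev - e, i)); prev = e
  -- 'for i, e in logs' unpacks the two-element row (Pre_ guarantees length 2)
  let st := logs.foldl (fun (s : Int × List (Int × Int)) row =>
      let i := row.headD 0
      let e := (row.drop 1).headD 0
      (e, s.2 ++ [(s.1 - e, i)])) ((0 : Int), [((0 : Int), (0 : Int))])
  -- cands.sort(): lexicographic sort of int pairs
  let sorted := PySem.List.sorted2 st.2 (fun c => c.1) (fun c => c.2)
  -- cands[0][1]: cands starts with (0,0), so the sorted list is provably nonempty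
  (sorted.headD (0, 0)).2

-- ===== PRECONDITION & SPEC =====
-- Pre_ excludes exactly the inputs where both Pythons raise ValueError: a row that is
-- not a pair cannot be unpacked by 'for i, e in logs'.
def Pre_solution_1686_3 (n : Int) (logs : List (List Int)) : Prop :=
  ∀ r ∈ logs, r.length = 2
instance (n : Int) (logs : List (List Int)) : Decidable (Pre_solution_1686_3 n logs) := by
  unfold Pre_solution_1686_3; infer_instance

def pvWitness_solution_1686_3 : Int × List (List Int) := (2, [[0, 3], [1, 5]])

def Spec_solution_1686_3 (n : Int) (logs : List (List Int)) (out : Int) : Prop := out = solution_1686_3_alt n logs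
instance (n : Int) (logs : List (List Int)) (out : Int) : Decidable (Spec_solution_1686_3 n logs out) := by unfold Spec_solution_1686_3; infer_instance

-- ===== CLAIM (what is proved, stated in full; the proofs are below) =====
def Claim_equal_solution_1686_3 : Prop := ∀ (n : Int) (logs : List (List Int)), Dom_solution_1686_3 n logs → Pre_solution_1686_3 n logs → Spec_solution_1686_3 n logs (solution_1686_3 n logs)

-- ===== LEMMAS AND PROOFS =====

-- strict lexicographic order on int pairs (Python's tuple '<')
def pvLexLt (a b : Int × Int) : Bool := a.1 < b.1 || (a.1 == b.1 && a.2 < b.2)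

theorem pvLexLt_trans {a b c : Int × Int} (h1 : pvLexLt a b = true) (h2 : pvLexLt b c = true) :
    pvLexLt a c = true := by
  rcases a with ⟨a1, a2⟩; rcases b with ⟨b1, b2⟩; rcases c with ⟨c1, c2⟩
  simp only [pvLexLt, Bool.or_eq_true, Bool.and_eq_true, decide_eq_true_eq, beq_iff_eq] at *
  omega

theorem pvLexLt_eq_of_not {a b : Int × Int} (h1 : pvLexLt a b = false) (h2 : pvLexLt b a = false) :
    a = b := by
  rcases a with ⟨a1, a2⟩; rcases b with ⟨b1, b2⟩
  simp only [pvLexLt, Bool.or_eq_false_iff, Bool.and_eq_false_iff, decide_eq_false_iff_not,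
    beq_eq_false_iff_ne, ne_eq, Prod.mk.injEq] at *
  omega

-- the candidate stream: (prev - e, i) for each row, prev threaded through
def pvStream : List (List Int) → Int → List (Int × Int)
  | [], _ => []
  | r :: t, p => (p - (r.drop 1).headD 0, r.headD 0) :: pvStream t ((r.drop 1).headD 0)

-- running lexicographic minimum
def pvLMin (best c : Int × Int) : Int × Int := if pvLexLt c best then c else best

-- B's candidate-building loop produces acc ++ pvStream logs p
theorem pvB_cands_eq (logs : List (List Int)) (p : Int) (acc : List (Int × Int)) :
    (logs.foldl (fun (s : Int × List (Int × Int)) row =>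
        let i := row.headD 0
        let e := (row.drop 1).headD 0
        (e, s.2 ++ [(s.1 - e, i)])) (p, acc)).2 = acc ++ pvStream logs p := by
  induction logs generalizing p acc with
  | nil => simp [pvStream]
  | cons r t ih =>
      simp only [List.foldl_cons, pvStream]
      rw [ih]
      simp

theorem pvLexLt_irrefl (a : Int × Int) : pvLexLt a a = false := by
  rcases a with ⟨a1, a2⟩; simp [pvLexLt]

theorem pvLexLt_total {a b : Int × Int} (h : pvLexLt a b = false) :
    b = a ∨ pvLexLt b a = true := by
  rcases a with ⟨a1, a2⟩; rcases b with ⟨b1, b2⟩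
  simp only [pvLexLt, Bool.or_eq_false_iff, Bool.and_eq_false_iff, Bool.or_eq_true,
    Bool.and_eq_true, decide_eq_false_iff_not, decide_eq_true_eq, beq_iff_eq,
    beq_eq_false_iff_ne, ne_eq, Prod.mk.injEq] at *
  omega

-- A's loop computes the running lexicographic minimum of the (negated) stream
theorem pvA_min (logs : List (List Int)) (h : ∀ r ∈ logs, r.length = 2)
    (p mt ans : Int) :
    (logs.foldl (fun (st : Int × Int × Int) row =>
        match row with
        | [i, e] =>
          let t := e - st.1
          if t ≥ st.2.1 then (e, t, if t = st.2.1 then min st.2.2 i else i)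
          else (e, st.2.1, st.2.2)
        | _ => st) (p, mt, ans)).2 =
      (-(((pvStream logs p).foldl pvLMin (-mt, ans)).1),
        ((pvStream logs p).foldl pvLMin (-mt, ans)).2) := by
  induction logs generalizing p mt ans with
  | nil => simp [pvStream]
  | cons r t ih =>
      have hr : r.length = 2 := h r (List.mem_cons_self ..)
      match r, hr with
      | [i, e], _ =>
        have ht : ∀ r ∈ t, r.length = 2 := fun r hm => h r (List.mem_cons_of_mem _ hm)
        simp only [List.foldl_cons, pvStream, List.headD, List.drop]
        have hstep :
            ((if e - p ≥ mt then (e, e - p, if e - p = mt then min ans i else i)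
              else (e, mt, ans)) : Int × Int × Int) =
            (e, -(pvLMin (-mt, ans) (p - e, i)).1, (pvLMin (-mt, ans) (p - e, i)).2) := by
          simp only [pvLMin, pvLexLt, Bool.or_eq_true, Bool.and_eq_true, decide_eq_true_eq,
            beq_iff_eq]
          split_ifs <;> simp_all [Prod.mk.injEq, min_def] <;> omega
        rw [hstep]
        have := ih ht e (-(pvLMin (-mt, ans) (p - e, i)).1) ((pvLMin (-mt, ans) (p - e, i)).2)
        simpa only [neg_neg] using this

-- membership through the insertion-sort fold
theorem pvMem_foldl_insertBy (l : List (Int × Int)) (acc : List (Int × Int)) (y : Int × Int) :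
    y ∈ l.foldl (fun acc x => PySem.List.insertBy pvLexLt x acc) acc ↔ y ∈ acc ∨ y ∈ l := by
  induction l generalizing acc with
  | nil => simp
  | cons x t ih =>
      simp only [List.foldl_cons, ih, PySem.List.mem_insertBy, List.mem_cons]
      tauto

-- insertBy preserves sortedness (pairwise "no later element strictly before an earlier one")
theorem pvInsertBy_pairwise (x : Int × Int) (l : List (Int × Int))
    (hl : l.Pairwise (fun a b => pvLexLt b a = false)) :
    (PySem.List.insertBy pvLexLt x l).Pairwise (fun a b => pvLexLt b a = false) := by
  induction l with
  | nil => simp [PySem.List.insertBy]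
  | cons y ys ih =>
      rw [List.pairwise_cons] at hl
      by_cases hxy : pvLexLt x y = true
      · simp only [PySem.List.insertBy, hxy, if_pos]
        refine List.pairwise_cons.2 ⟨?_, List.pairwise_cons.2 ⟨hl.1, hl.2⟩⟩
        intro z hz
        rcases List.mem_cons.1 hz with rfl | hz'
        · cases hyx : pvLexLt z x with
          | false => rfl
          | true => exact absurd (pvLexLt_trans hxy hyx) (by simp [pvLexLt_irrefl])
        · cases hzx : pvLexLt z x with
          | false => rfl
          | true => exact absurd (pvLexLt_trans hzx hxy) (by simp [hl.1 z hz'])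
      · simp only [PySem.List.insertBy, hxy, if_neg, Bool.not_eq_true]
        refine List.pairwise_cons.2 ⟨?_, ih hl.2⟩
        intro z hz
        rcases (PySem.List.mem_insertBy pvLexLt x z ys).1 hz with rfl | hz'
        · simpa using hxy
        · exact hl.1 z hz'

theorem pvFoldl_insertBy_pairwise (l : List (Int × Int)) (acc : List (Int × Int))
    (hacc : acc.Pairwise (fun a b => pvLexLt b a = false)) :
    (l.foldl (fun acc x => PySem.List.insertBy pvLexLt x acc) acc).Pairwise
      (fun a b => pvLexLt b a = false) := by
  induction l generalizing acc with
  | nil => exact hacc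
  | cons x t ih => exact ih _ (pvInsertBy_pairwise x acc hacc)

-- sorted2 with the two projections is exactly insertion sort by pvLexLt
theorem pvCmp_eq :
    (fun (a b : Int × Int) =>
        decide (a.1 < b.1) || (!decide (b.1 < a.1) && decide (a.2 < b.2))) = pvLexLt := by
  funext a b
  rcases a with ⟨a1, a2⟩; rcases b with ⟨b1, b2⟩
  simp only [pvLexLt]
  rcases lt_trichotomy a1 b1 with h | h | h
  · simp [h]
  · subst h; simp
  · simp [h, h.ne', lt_asymm h]

theorem pvSorted2_eq (cands : List (Int × Int)) :
    PySem.List.sorted2 cands (fun c => c.1) (fun c => c.2) =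
      cands.foldl (fun acc x => PySem.List.insertBy pvLexLt x acc) [] := by
  show cands.foldl (fun acc x => PySem.List.insertBy
      (fun (a b : Int × Int) =>
        decide (a.1 < b.1) || (!decide (b.1 < a.1) && decide (a.2 < b.2))) x acc) [] =
    cands.foldl (fun acc x => PySem.List.insertBy pvLexLt x acc) []
  rw [pvCmp_eq]

-- the running-min fold yields a member that is lexicographically minimal
theorem pvFoldl_lmin_spec (l : List (Int × Int)) (b : Int × Int) :
    (l.foldl pvLMin b = b ∨ l.foldl pvLMin b ∈ l) ∧
      (∀ y, (y = b ∨ y ∈ l) → pvLexLt y (l.foldl pvLMin b) = false) := by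
  induction l generalizing b with
  | nil =>
      refine ⟨Or.inl rfl, ?_⟩
      rintro y (rfl | h)
      · exact pvLexLt_irrefl y
      · simp at h
  | cons c t ih =>
      simp only [List.foldl_cons]
      obtain ⟨hmem, hmin⟩ := ih (pvLMin b c)
      have hr := hmin (pvLMin b c) (Or.inl rfl)
      have hL : pvLMin b c = b ∨ pvLMin b c = c := by
        unfold pvLMin; split_ifs
        · exact Or.inr rfl
        · exact Or.inl rfl
      refine ⟨?_, ?_⟩
      · rcases hmem with h | h
        · rcases hL with hL | hL <;> rw [hL] at h ⊢ <;> simp [h]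
        · exact Or.inr (List.mem_cons_of_mem _ h)
      · rintro y (rfl | hy)
        · -- y = b
          by_cases hcb : pvLexLt c y = true
          · have heq : pvLMin y c = c := by unfold pvLMin; rw [if_pos hcb]
            rw [heq] at hr ⊢
            cases hbr : pvLexLt y (t.foldl pvLMin c) with
            | false => rfl
            | true => exact absurd (pvLexLt_trans hcb hbr) (by simp [hr])
          · have heq : pvLMin y c = y := by unfold pvLMin; rw [if_neg hcb]
            rw [heq] at hr ⊢
            exact hr
        · rcases List.mem_cons.1 hy with rfl | hy'
          · -- y = c
            by_cases hcb : pvLexLt y b = true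
            · have heq : pvLMin b y = y := by unfold pvLMin; rw [if_pos hcb]
              rw [heq] at hr ⊢
              exact hr
            · have heq : pvLMin b y = b := by unfold pvLMin; rw [if_neg hcb]
              rw [heq] at hr ⊢
              cases hcr : pvLexLt y (t.foldl pvLMin b) with
              | false => rfl
              | true =>
                  rcases pvLexLt_total (show pvLexLt y b = false by
                      simpa using hcb) with heq2 | hby
                  · subst heq2
                    exact absurd hcr (by simp [hr])
                  · exact absurd (pvLexLt_trans hby hcr) (by simp [hr])
          · exact hmin y (Or.inr hy')

-- ===== VERDICT (by name: the statement is the Claim_ definition above) =====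
theorem solution_1686_3_spec : Claim_equal_solution_1686_3 := by
  intro n logs _ hpre
  simp only [Spec_solution_1686_3, solution_1686_3, solution_1686_3_alt]
  rw [pvA_min logs hpre 0 0 0, pvB_cands_eq logs 0 [((0 : Int), (0 : Int))],
    pvSorted2_eq]
  simp only [neg_zero, List.nil_append, List.cons_append]
  -- the sorted list: membership and head-minimality
  set cands : List (Int × Int) := ((0 : Int), (0 : Int)) :: pvStream logs 0 with hcands
  set s := cands.foldl (fun acc x => PySem.List.insertBy pvLexLt x acc) [] with hs
  have hmemS : ∀ y, y ∈ s ↔ y ∈ cands := by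
    intro y; rw [hs, pvMem_foldl_insertBy]; simp
  have hpw : s.Pairwise (fun a b => pvLexLt b a = false) :=
    pvFoldl_insertBy_pairwise cands [] (by simp)
  have hne : s ≠ [] := by
    intro h0
    have := (hmemS ((0 : Int), (0 : Int))).2 (by simp [hcands])
    simp [h0] at this
  obtain ⟨m', tl, hsm⟩ := List.exists_cons_of_ne_nil hne
  have hm'cands : m' ∈ cands := (hmemS m').1 (by simp [hsm])
  have hm'min : ∀ y ∈ cands, pvLexLt y m' = false := by
    intro y hy
    have hyS : y ∈ s := (hmemS y).2 hy
    rw [hsm] at hyS hpw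
    rcases List.mem_cons.1 hyS with rfl | hy'
    · exact pvLexLt_irrefl y
    · exact (List.pairwise_cons.1 hpw).1 y hy'
  -- the fold-min: membership and minimality
  obtain ⟨hmmem, hmmin⟩ := pvFoldl_lmin_spec (pvStream logs 0) ((0 : Int), (0 : Int))
  set m := (pvStream logs 0).foldl pvLMin ((0 : Int), (0 : Int)) with hm
  have hmcands : m ∈ cands := by
    rcases hmmem with h | h
    · simp [hcands, h]
    · simp [hcands, h]
  have h1 : pvLexLt m m' = false := hm'min m hmcands
  have h2 : pvLexLt m' m = false := by
    apply hmmin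
    rcases List.mem_cons.1 (hcands ▸ hm'cands) with h | h
    · exact Or.inl h
    · exact Or.inr h
  have : m = m' := pvLexLt_eq_of_not h1 h2
  rw [hsm]
  simp [this]
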